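-- pv_equiv track=rewrite | github.com/veeral-patel/leetcode-samples | nqueens.py | findNextSpots
-- ===== SOURCE A (Python) =====
-- def findNextSpots(board):
--     badRows = set()
--     badCols = set()
--     badDiags = set()
--     badNegativeDiags = set()
--
--     # blacklist spots blocked by queens
--     for i, row in enumerate(board):
--         for j, val in enumerate(row):
--             if board[i][j] == "Q":
--                 badRows.add(i)
--                 badCols.add(j)
--                 badDiags.add(i-j)
--                 badNegativeDiags.add(i+j)
--
--     # build list of eligible next spots
--     nextSpots = []
--     for i, row in enumerate(board):
--         for j, val in enumerate(row):
--             cond1 = i not in badRows and j not in badCols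
--             cond2 = i-j not in badDiags
--             cond3 = i+j not in badNegativeDiags
--             if cond1 and cond2 and cond3:
--                 nextSpots.append((i,j))
--
--     return nextSpots
-- ===== SOURCE B (Python) =====
-- def findNextSpots(board):
--     # collect queen coordinates once
--     queens = []
--     for i, row in enumerate(board):
--         for j, val in enumerate(row):
--             if val == "Q":
--                 queens.append((i, j))
--     # a cell is eligible iff no queen attacks it (row, column, either diagonal)
--     nextSpots = []
--     for i, row in enumerate(board):
--         for j, val in enumerate(row):
--             if all(qi != i and qj != j and qi - qj != i - j and qi + qj != i + j
--                    for qi, qj in queens):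
--                 nextSpots.append((i, j))
--     return nextSpots
-- ===== Notes on version B (the rewrite author's own statement) =====
-- stated objective: alternative
-- what changed: B replaces A's four blacklist index sets and per-cell 4-way set-membership test with a single list of queen coordinates and a direct per-cell check against every queen.
import Mathlib
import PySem

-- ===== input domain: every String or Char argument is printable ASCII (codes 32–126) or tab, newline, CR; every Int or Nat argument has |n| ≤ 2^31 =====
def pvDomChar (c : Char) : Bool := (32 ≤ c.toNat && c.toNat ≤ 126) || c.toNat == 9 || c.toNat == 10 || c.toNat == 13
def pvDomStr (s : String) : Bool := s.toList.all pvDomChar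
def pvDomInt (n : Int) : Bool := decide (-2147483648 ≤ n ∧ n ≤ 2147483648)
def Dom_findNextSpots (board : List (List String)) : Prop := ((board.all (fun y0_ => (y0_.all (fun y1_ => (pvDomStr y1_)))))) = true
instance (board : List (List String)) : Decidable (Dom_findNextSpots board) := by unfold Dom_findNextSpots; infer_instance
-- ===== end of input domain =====

-- B replaces A's four blacklist index sets and per-cell 4-way membership test with a
-- single list of queen coordinates and a direct per-cell check against every queen.


-- ===== PORT A =====
def findNextSpots (board : List (List String)) : List (Int × Int) :=
  -- four blacklist sets built from the queens
  let bad : PySem.Set Int × PySem.Set Int × PySem.Set Int × PySem.Set Int :=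
    (PySem.List.enumerate board).foldl (fun st ir =>
      (PySem.List.enumerate ir.2).foldl (fun st jv =>
        if ((PySem.List.pyGet? board ir.1).bind (fun r => PySem.List.pyGet? r jv.1)) = some "Q" then
          (PySem.Set.add st.1 ir.1, PySem.Set.add st.2.1 jv.1,
           PySem.Set.add st.2.2.1 (ir.1 - jv.1), PySem.Set.add st.2.2.2 (ir.1 + jv.1))
        else st) st)
      (PySem.Set.empty, PySem.Set.empty, PySem.Set.empty, PySem.Set.empty)
  -- build list of eligible next spots
  (PySem.List.enumerate board).foldl (fun acc ir =>
    (PySem.List.enumerate ir.2).foldl (fun acc jv =>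
      let cond1 := !(PySem.Set.contains bad.1 ir.1) && !(PySem.Set.contains bad.2.1 jv.1)
      let cond2 := !(PySem.Set.contains bad.2.2.1 (ir.1 - jv.1))
      let cond3 := !(PySem.Set.contains bad.2.2.2 (ir.1 + jv.1))
      if cond1 && cond2 && cond3 then acc ++ [(ir.1, jv.1)] else acc) acc) []

-- ===== PORT B =====
def findNextSpots_alt (board : List (List String)) : List (Int × Int) :=
  let queens : List (Int × Int) :=
    (PySem.List.enumerate board).foldl (fun qs ir =>
      (PySem.List.enumerate ir.2).foldl (fun qs jv =>
        if jv.2 = "Q" then qs ++ [(ir.1, jv.1)] else qs) qs) []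
  (PySem.List.enumerate board).foldl (fun acc ir =>
    (PySem.List.enumerate ir.2).foldl (fun acc jv =>
      if queens.all (fun q =>
          !(q.1 == ir.1) && !(q.2 == jv.1) && !(q.1 - q.2 == ir.1 - jv.1) && !(q.1 + q.2 == ir.1 + jv.1))
      then acc ++ [(ir.1, jv.1)] else acc) acc) []

-- ===== PRECONDITION & SPEC =====
def Spec_findNextSpots (board : List (List String)) (out : List (Int × Int)) : Prop := out = findNextSpots_alt board
instance (board : List (List String)) (out : List (Int × Int)) : Decidable (Spec_findNextSpots board out) := by unfold Spec_findNextSpots; infer_instance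

-- ===== CLAIM (what is proved, stated in full; the proofs are below) =====
def Claim_equal_findNextSpots : Prop := ∀ (board : List (List String)), Dom_findNextSpots board → Spec_findNextSpots board (findNextSpots board)

-- ===== LEMMAS AND PROOFS =====

-- the cells of the board, row-major, with their coordinates
def pvCells (board : List (List String)) : List (Int × Int × String) :=
  (PySem.List.enumerate board).flatMap (fun ir =>
    (PySem.List.enumerate ir.2).map (fun jv => (ir.1, jv.1, jv.2)))

-- the queen cells, in order
def pvQC (board : List (List String)) : List (Int × Int × String) :=
  (pvCells board).filter (fun c => decide (c.2.2 = "Q"))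

-- a nested enumerate-fold is a fold over the flattened cell list
theorem pvNestedFold {σ : Type} (board : List (List String)) (f : σ → Int → Int → String → σ) (init : σ) :
    (PySem.List.enumerate board).foldl (fun st ir =>
      (PySem.List.enumerate ir.2).foldl (fun st jv => f st ir.1 jv.1 jv.2) st) init
    = (pvCells board).foldl (fun st c => f st c.1 c.2.1 c.2.2) init := by
  simp [pvCells, List.foldl_flatMap, List.foldl_map]

-- indexing the enumerated list gives back the element
theorem pvEnumGet {α : Type} (xs : List α) (p : Int × α) (hp : p ∈ PySem.List.enumerate xs 0) :
    PySem.List.pyGet? xs p.1 = some p.2 := by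
  rw [PySem.List.mem_enumerate_iff] at hp
  obtain ⟨k, hk, rfl⟩ := hp
  simp [PySem.List.pyGet?_ofNat xs k hk]

-- board[i][j] is the value stored in the cell
theorem pvCellGet (board : List (List String)) (c : Int × Int × String) (hc : c ∈ pvCells board) :
    ((PySem.List.pyGet? board c.1).bind (fun r => PySem.List.pyGet? r c.2.1)) = some c.2.2 := by
  simp only [pvCells, List.mem_flatMap, List.mem_map] at hc
  obtain ⟨ir, hir, jv, hjv, rfl⟩ := hc
  simp [pvEnumGet board ir hir, pvEnumGet ir.2 jv hjv]

-- A's phase 1: the four blacklist sets are folds of Set.add over the queen cells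
theorem pvPhase1 (board : List (List String)) :
    ((PySem.List.enumerate board).foldl (fun st ir =>
      (PySem.List.enumerate ir.2).foldl (fun st jv =>
        if ((PySem.List.pyGet? board ir.1).bind (fun r => PySem.List.pyGet? r jv.1)) = some "Q" then
          (PySem.Set.add st.1 ir.1, PySem.Set.add st.2.1 jv.1,
           PySem.Set.add st.2.2.1 (ir.1 - jv.1), PySem.Set.add st.2.2.2 (ir.1 + jv.1))
        else st) st)
      ((PySem.Set.empty, PySem.Set.empty, PySem.Set.empty, PySem.Set.empty) :
        PySem.Set Int × PySem.Set Int × PySem.Set Int × PySem.Set Int))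
    = ((pvQC board).foldl (fun s c => PySem.Set.add s c.1) PySem.Set.empty,
       (pvQC board).foldl (fun s c => PySem.Set.add s c.2.1) PySem.Set.empty,
       (pvQC board).foldl (fun s c => PySem.Set.add s (c.1 - c.2.1)) PySem.Set.empty,
       (pvQC board).foldl (fun s c => PySem.Set.add s (c.1 + c.2.1)) PySem.Set.empty) := by
  rw [pvNestedFold board (fun st i j _ =>
        if ((PySem.List.pyGet? board i).bind (fun r => PySem.List.pyGet? r j)) = some "Q" then
          (PySem.Set.add st.1 i, PySem.Set.add st.2.1 j,
           PySem.Set.add st.2.2.1 (i - j), PySem.Set.add st.2.2.2 (i + j))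
        else st)]
  have hstep := PySem.List.foldl_congr_mem' (pvCells board)
      (fun (st : PySem.Set Int × PySem.Set Int × PySem.Set Int × PySem.Set Int) c =>
        if ((PySem.List.pyGet? board c.1).bind (fun r => PySem.List.pyGet? r c.2.1)) = some "Q" then
          (PySem.Set.add st.1 c.1, PySem.Set.add st.2.1 c.2.1,
           PySem.Set.add st.2.2.1 (c.1 - c.2.1), PySem.Set.add st.2.2.2 (c.1 + c.2.1))
        else st)
      (fun st c =>
        if c.2.2 = "Q" then
          (PySem.Set.add st.1 c.1, PySem.Set.add st.2.1 c.2.1,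
           PySem.Set.add st.2.2.1 (c.1 - c.2.1), PySem.Set.add st.2.2.2 (c.1 + c.2.1))
        else st)
      (PySem.Set.empty, PySem.Set.empty, PySem.Set.empty, PySem.Set.empty)
      (by intro c hc st; simp [pvCellGet board c hc])
  rw [hstep, PySem.List.foldl_ite_eq_foldl_filter, ← pvQC]
  rw [PySem.List.foldl_prod_mk (f := fun s (c : Int × Int × String) => PySem.Set.add s c.1)
      (g := fun (st : PySem.Set Int × PySem.Set Int × PySem.Set Int) (c : Int × Int × String) =>
        (PySem.Set.add st.1 c.2.1, PySem.Set.add st.2.1 (c.1 - c.2.1), PySem.Set.add st.2.2 (c.1 + c.2.1)))]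
  rw [PySem.List.foldl_prod_mk (f := fun s (c : Int × Int × String) => PySem.Set.add s c.2.1)
      (g := fun (st : PySem.Set Int × PySem.Set Int) (c : Int × Int × String) =>
        (PySem.Set.add st.1 (c.1 - c.2.1), PySem.Set.add st.2 (c.1 + c.2.1)))]
  rw [PySem.List.foldl_prod_mk (f := fun s (c : Int × Int × String) => PySem.Set.add s (c.1 - c.2.1))
      (g := fun (s : PySem.Set Int) (c : Int × Int × String) => PySem.Set.add s (c.1 + c.2.1))]

-- A as a filter-map over the cells
theorem pvA_eq (board : List (List String)) :
    findNextSpots board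
    = ((pvCells board).filter (fun c =>
        (!(PySem.Set.contains ((pvQC board).foldl (fun s d => PySem.Set.add s d.1) PySem.Set.empty) c.1)
          && !(PySem.Set.contains ((pvQC board).foldl (fun s d => PySem.Set.add s d.2.1) PySem.Set.empty) c.2.1))
        && !(PySem.Set.contains ((pvQC board).foldl (fun s d => PySem.Set.add s (d.1 - d.2.1)) PySem.Set.empty) (c.1 - c.2.1))
        && !(PySem.Set.contains ((pvQC board).foldl (fun s d => PySem.Set.add s (d.1 + d.2.1)) PySem.Set.empty) (c.1 + c.2.1)))).map
        (fun c => (c.1, c.2.1)) := by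
  unfold findNextSpots
  rw [pvPhase1 board]
  rw [pvNestedFold board (fun acc i j _ =>
      if (!(PySem.Set.contains ((pvQC board).foldl (fun s d => PySem.Set.add s d.1) PySem.Set.empty) i)
          && !(PySem.Set.contains ((pvQC board).foldl (fun s d => PySem.Set.add s d.2.1) PySem.Set.empty) j))
        && !(PySem.Set.contains ((pvQC board).foldl (fun s d => PySem.Set.add s (d.1 - d.2.1)) PySem.Set.empty) (i - j))
        && !(PySem.Set.contains ((pvQC board).foldl (fun s d => PySem.Set.add s (d.1 + d.2.1)) PySem.Set.empty) (i + j))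
      then acc ++ [(i, j)] else acc)]
  rw [PySem.List.foldl_append_if]
  simp

-- the queen-collecting fold over the cells, as a map over the queen cells
theorem pvQFold (board : List (List String)) :
    (pvCells board).foldl (fun qs c => if c.2.2 = "Q" then qs ++ [(c.1, c.2.1)] else qs)
      ([] : List (Int × Int))
    = (pvQC board).map (fun d => (d.1, d.2.1)) := by
  rw [PySem.List.foldl_append_ite, ← pvQC]
  simp

-- B as a filter-map over the cells
theorem pvB_eq (board : List (List String)) :
    findNextSpots_alt board
    = ((pvCells board).filter (fun c =>
        ((pvQC board).map (fun d => (d.1, d.2.1))).all (fun q =>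
          !(q.1 == c.1) && !(q.2 == c.2.1) && !(q.1 - q.2 == c.1 - c.2.1) && !(q.1 + q.2 == c.1 + c.2.1)))).map
        (fun c => (c.1, c.2.1)) := by
  unfold findNextSpots_alt
  rw [pvNestedFold board (fun qs i j v => if v = "Q" then qs ++ [(i, j)] else qs)]
  generalize hQ : (pvCells board).foldl
      (fun qs c => if c.2.2 = "Q" then qs ++ [(c.1, c.2.1)] else qs) ([] : List (Int × Int)) = Q
  rw [pvNestedFold board (fun acc i j _ =>
      if Q.all (fun q => !(q.1 == i) && !(q.2 == j) && !(q.1 - q.2 == i - j) && !(q.1 + q.2 == i + j))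
      then acc ++ [(i, j)] else acc)]
  rw [PySem.List.foldl_append_if]
  rw [← hQ, pvQFold]
  simp

-- the two per-cell tests agree
theorem pvCond_eq (L : List (Int × Int × String)) (c : Int × Int × String) :
    ((!(PySem.Set.contains (L.foldl (fun s d => PySem.Set.add s d.1) PySem.Set.empty) c.1)
        && !(PySem.Set.contains (L.foldl (fun s d => PySem.Set.add s d.2.1) PySem.Set.empty) c.2.1))
      && !(PySem.Set.contains (L.foldl (fun s d => PySem.Set.add s (d.1 - d.2.1)) PySem.Set.empty) (c.1 - c.2.1))
      && !(PySem.Set.contains (L.foldl (fun s d => PySem.Set.add s (d.1 + d.2.1)) PySem.Set.empty) (c.1 + c.2.1)))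
    = (L.map (fun d => (d.1, d.2.1))).all (fun q =>
        !(q.1 == c.1) && !(q.2 == c.2.1) && !(q.1 - q.2 == c.1 - c.2.1) && !(q.1 + q.2 == c.1 + c.2.1)) := by
  rw [Bool.eq_iff_iff]
  simp only [List.all_map, List.all_eq_true, Function.comp_apply, Bool.and_eq_true, Bool.not_eq_true',
    PySem.Set.contains_eq_listContains, List.contains_eq_mem, decide_eq_false_iff_not,
    PySem.Set.mem_foldl_add, List.not_mem_nil, false_or, PySem.Set.empty,
    not_exists, not_and, beq_eq_false_iff_ne, ne_eq]
  constructor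
  · rintro ⟨⟨⟨h1, h2⟩, h3⟩, h4⟩ d hd
    exact ⟨⟨⟨fun h => h1 d hd h.symm, fun h => h2 d hd h.symm⟩, fun h => h3 d hd h.symm⟩,
           fun h => h4 d hd h.symm⟩
  · intro h
    exact ⟨⟨⟨fun d hd he => (h d hd).1.1.1 he.symm, fun d hd he => (h d hd).1.1.2 he.symm⟩,
            fun d hd he => (h d hd).1.2 he.symm⟩, fun d hd he => (h d hd).2 he.symm⟩

-- ===== VERDICT (by name: the statement is the Claim_ definition above) =====
theorem findNextSpots_spec : Claim_equal_findNextSpots := by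
  intro board _
  unfold Spec_findNextSpots
  rw [pvA_eq, pvB_eq]
  congr 1
  apply List.filter_congr
  intro c _
  exact pvCond_eq (pvQC board) c
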